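-- pv_equiv track=rewrite | github.com/336104/grad-proj | data/conll2003.py | add_border_labels
-- ===== SOURCE A (Python) =====
-- def add_border_labels(examples):
--     border_labels = []
--     for tags in examples["ner_tags"]:
--         border_label = []
--         border_flag = 1
--         for tag in tags:
--             if tag == 0:
--                 border_label.append(1)
--             elif tag % 2 == 1:
--                 border_flag = -border_flag
--                 border_label.append(border_flag + 1)
--             else:
--                 border_label.append(border_flag + 1)
--         border_labels.append(border_label)
--     return {"labels": border_labels}
-- ===== SOURCE B (Python) =====
-- def add_border_labels(examples):
--     border_labels = []
--     for tags in examples["ner_tags"]: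
--         # pass 1: cumulative parity of the tags up to and including each position
--         par = []
--         p = 0
--         for t in tags:
--             p = (p + t) % 2
--             par.append(p)
--         # pass 2: map each (tag, parity) pair to its border label
--         border_labels.append([1 if t == 0 else 2 - 2 * q
--                               for t, q in zip(tags, par)])
--     return {"labels": border_labels}
-- ===== Notes on version B (the rewrite author's own statement) =====
-- stated objective: alternative
-- what changed: Replaces the interleaved +/-1 toggle-flag accumulator with two separate passes: first materialize a cumulative-parity table of the tags, then map each (tag, parity) pair to its label arithmetically (2 - 2*parity).
import Mathlib
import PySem

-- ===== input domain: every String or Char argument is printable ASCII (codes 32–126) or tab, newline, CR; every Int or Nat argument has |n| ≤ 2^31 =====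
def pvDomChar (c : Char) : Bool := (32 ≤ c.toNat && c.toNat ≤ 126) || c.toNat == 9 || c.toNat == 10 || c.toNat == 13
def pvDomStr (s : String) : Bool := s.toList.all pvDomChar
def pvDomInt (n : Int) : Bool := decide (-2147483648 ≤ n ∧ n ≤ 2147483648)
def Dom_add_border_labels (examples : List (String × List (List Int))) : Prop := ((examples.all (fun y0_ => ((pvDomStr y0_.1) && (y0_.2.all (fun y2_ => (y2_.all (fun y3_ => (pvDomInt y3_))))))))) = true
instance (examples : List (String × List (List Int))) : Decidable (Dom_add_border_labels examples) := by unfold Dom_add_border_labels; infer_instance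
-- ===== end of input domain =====

-- B replaces A's interleaved +/-1 toggle-flag accumulator with a two-pass scheme
-- (cumulative-parity table, then an arithmetic mapping pass); same cost, different decomposition.


-- ===== PORT A =====
-- inner loop of A: state = (border_label so far, border_flag)
def pvAStep (s : List Int × Int) (tag : Int) : List Int × Int :=
  if tag = 0 then (s.1 ++ [1], s.2)
  else if tag % 2 = 1 then (s.1 ++ [(-s.2) + 1], -s.2)
  else (s.1 ++ [s.2 + 1], s.2)

def add_border_labels (examples : List (String × List (List Int))) : List (String × List (List Int)) :=
  match PySem.Dict.get? (PySem.Dict.mk examples) "ner_tags" with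
  | none => []   -- unreachable under Pre_ (Python raises KeyError here)
  | some tagsLists =>
    let border_labels := tagsLists.foldl
      (fun acc tags => acc ++ [(tags.foldl pvAStep ([], 1)).1]) []
    [("labels", border_labels)]

-- ===== PORT B =====
-- pass 1 of B: state = (parity table so far, running parity)
def pvBStep (s : List Int × Int) (t : Int) : List Int × Int :=
  let p := (s.2 + t) % 2
  (s.1 ++ [p], p)

def add_border_labels_alt (examples : List (String × List (List Int))) : List (String × List (List Int)) :=
  match PySem.Dict.get? (PySem.Dict.mk examples) "ner_tags" with
  | none => []   -- unreachable under Pre_ (Python raises KeyError here)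
  | some tagsLists =>
    [("labels", tagsLists.map (fun tags =>
      let par := (tags.foldl pvBStep ([], 0)).1
      (tags.zip par).map (fun tq => if tq.1 = 0 then 1 else 2 - 2 * tq.2)))]

-- ===== PRECONDITION & SPEC =====
-- Pre_ excludes exactly the inputs without a "ner_tags" key, on which Python A raises KeyError.
def Pre_add_border_labels (examples : List (String × List (List Int))) : Prop :=
  "ner_tags" ∈ examples.map Prod.fst
instance (examples : List (String × List (List Int))) : Decidable (Pre_add_border_labels examples) := by unfold Pre_add_border_labels; infer_instance

def pvWitness_add_border_labels : (List (String × List (List Int))) :=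
  [("ner_tags", [[0, 1, 2], [3, 0], []])]

def Spec_add_border_labels (examples : List (String × List (List Int))) (out : List (String × List (List Int))) : Prop := out = add_border_labels_alt examples
instance (examples : List (String × List (List Int))) (out : List (String × List (List Int))) : Decidable (Spec_add_border_labels examples out) := by unfold Spec_add_border_labels; infer_instance

-- ===== CLAIM (what is proved, stated in full; the proofs are below) =====
def Claim_equal_add_border_labels : Prop := ∀ (examples : List (String × List (List Int))), Dom_add_border_labels examples → Pre_add_border_labels examples → Spec_add_border_labels examples (add_border_labels examples)

-- ===== LEMMAS AND PROOFS =====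

-- common recursive description of one sequence's labels, driven by the running parity p
def pvGSpec : List Int → Int → List Int
  | [], _ => []
  | t :: ts, p =>
    let p' := (p + t) % 2
    (if t = 0 then 1 else 2 - 2 * p') :: pvGSpec ts p'

-- parity table of B, recursively
def pvPar : List Int → Int → List Int
  | [], _ => []
  | t :: ts, p =>
    let p' := (p + t) % 2
    p' :: pvPar ts p'

lemma innerA (tags : List Int) : ∀ (acc : List Int) (p : Int), (p = 0 ∨ p = 1) →
    (tags.foldl pvAStep (acc, 1 - 2 * p)).1 = acc ++ pvGSpec tags p := by
  induction tags with
  | nil => intro acc p _; simp [pvGSpec]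
  | cons t ts ih =>
    intro acc p hp
    by_cases ht : t = 0
    · subst ht
      have hp' : (p + (0:Int)) % 2 = p := by omega
      have hstep : pvAStep (acc, 1 - 2 * p) 0 = (acc ++ [1], 1 - 2 * p) := by
        simp [pvAStep]
      rw [List.foldl_cons, hstep, ih _ p hp]
      simp [pvGSpec, show p % 2 = p by omega]
    · by_cases h1 : t % 2 = 1
      · -- odd: flag toggles
        have hp' : (p + t) % 2 = 1 - p := by omega
        have hstep : pvAStep (acc, 1 - 2 * p) t = (acc ++ [2 - 2 * (1 - p)], 1 - 2 * (1 - p)) := by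
          simp [pvAStep, ht, h1]
          omega
        rw [List.foldl_cons, hstep, ih _ (1 - p) (by omega)]
        simp [pvGSpec, ht, hp']
      · -- even, nonzero
        have h0 : t % 2 = 0 := by omega
        have hp' : (p + t) % 2 = p := by omega
        have hstep : pvAStep (acc, 1 - 2 * p) t = (acc ++ [2 - 2 * p], 1 - 2 * p) := by
          simp [pvAStep, ht, h1]
          omega
        rw [List.foldl_cons, hstep, ih _ p hp]
        simp [pvGSpec, ht, hp']

lemma foldB (tags : List Int) : ∀ (accL : List Int) (p : Int),
    (tags.foldl pvBStep (accL, p)).1 = accL ++ pvPar tags p := by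
  induction tags with
  | nil => intro accL p; simp [pvPar]
  | cons t ts ih =>
    intro accL p
    simp only [List.foldl_cons, pvBStep, pvPar]
    rw [ih]
    simp

lemma zipMapB (tags : List Int) : ∀ (p : Int),
    (tags.zip (pvPar tags p)).map (fun tq => if tq.1 = 0 then 1 else 2 - 2 * tq.2)
      = pvGSpec tags p := by
  induction tags with
  | nil => intro p; simp [pvPar, pvGSpec]
  | cons t ts ih =>
    intro p
    simp only [pvPar, pvGSpec, List.zip_cons_cons, List.map_cons]
    rw [ih]

lemma outerA (lists : List (List Int)) : ∀ (acc : List (List Int)),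
    lists.foldl (fun acc tags => acc ++ [(tags.foldl pvAStep ([], 1)).1]) acc
      = acc ++ lists.map (fun tags => pvGSpec tags 0) := by
  induction lists with
  | nil => intro acc; simp
  | cons l ls ih =>
    intro acc
    simp only [List.foldl_cons, List.map_cons]
    rw [ih]
    have h1 : ((1:Int) = 1 - 2 * 0) := by ring
    rw [h1, innerA l [] 0 (Or.inl rfl)]
    simp

-- ===== VERDICT (by name: the statement is the Claim_ definition above) =====
theorem add_border_labels_spec : Claim_equal_add_border_labels := by
  intro examples _ _
  unfold Spec_add_border_labels add_border_labels add_border_labels_alt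
  cases h : PySem.Dict.get? (PySem.Dict.mk examples) "ner_tags" with
  | none => rfl
  | some tagsLists =>
    simp only []
    congr 1
    congr 1
    rw [outerA tagsLists []]
    simp only [List.nil_append]
    apply List.map_congr_left
    intro tags _
    rw [foldB tags [] 0, List.nil_append, zipMapB tags 0]
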